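-- pv_equiv track=rewrite | github.com/alancsouza/data-structures-and-algorithms | spaceship.py | solve_spaceship
-- ===== SOURCE A (Python) =====
-- def solve_spaceship(
--     spaceship_power: list,
--     base_defense: list,
--     base_gold: list
-- ):
--     base_defense_gold = list(zip(base_defense, base_gold))
--
--     total_gold_per_ship = []
--
--     for ship in spaceship_power:
--         total_gold = sum(
--             [gold for defense_power, gold in base_defense_gold if ship >= defense_power]
--         )
--
--         total_gold_per_ship.append(total_gold)
--
--     return total_gold_per_ship
-- ===== SOURCE B (Python) =====
-- def solve_spaceship(
--     spaceship_power: list,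
--     base_defense: list,
--     base_gold: list
-- ):
--     # Sort bases by defense, prefix-sum the gold, binary-search per ship.
--     pairs = sorted(zip(base_defense, base_gold), key=lambda p: p[0])
--     defenses = [d for d, _ in pairs]
--     prefix = [0]
--     total = 0
--     for _, g in pairs:
--         total += g
--         prefix.append(total)
--     return [prefix[_upper_bound(defenses, ship, 0, len(defenses))]
--             for ship in spaceship_power]
--
--
-- def _upper_bound(defenses, x, lo, hi):
--     # index of the first defense strictly greater than x (bisect_right)
--     if lo >= hi:
--         return lo
--     mid = (lo + hi) // 2
--     if x < defenses[mid]: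
--         return _upper_bound(defenses, x, lo, mid)
--     return _upper_bound(defenses, x, mid + 1, hi)
-- ===== Notes on version B (the rewrite author's own statement) =====
-- stated objective: faster
-- what changed: B sorts the (defense, gold) pairs once, builds a prefix-sum array of the golds, and answers each ship with a hand-written binary search into the sorted defenses, replacing A's full scan of all bases for every ship.
import Mathlib
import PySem

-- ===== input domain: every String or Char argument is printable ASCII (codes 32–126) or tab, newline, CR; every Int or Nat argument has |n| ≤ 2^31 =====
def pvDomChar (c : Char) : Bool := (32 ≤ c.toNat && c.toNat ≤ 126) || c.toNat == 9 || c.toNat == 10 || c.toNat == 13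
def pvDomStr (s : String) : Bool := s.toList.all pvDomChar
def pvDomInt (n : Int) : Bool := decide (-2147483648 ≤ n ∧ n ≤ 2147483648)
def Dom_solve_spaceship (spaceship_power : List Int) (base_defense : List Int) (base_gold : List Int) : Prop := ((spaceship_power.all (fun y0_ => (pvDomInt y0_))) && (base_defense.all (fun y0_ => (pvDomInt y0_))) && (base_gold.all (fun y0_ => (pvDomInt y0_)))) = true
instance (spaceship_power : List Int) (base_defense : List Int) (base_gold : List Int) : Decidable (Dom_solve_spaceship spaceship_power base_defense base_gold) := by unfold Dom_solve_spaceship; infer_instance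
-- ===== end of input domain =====

-- B replaces A's per-ship scan of all bases by sort + prefix sums + binary search (different algorithm; measurably faster on large inputs).

-- ===== PORT A =====
-- for ship in …: total = sum([gold for d, g in base_defense_gold if ship >= d]); out.append(total)
def solve_spaceship (spaceship_power : List Int) (base_defense : List Int) (base_gold : List Int) : List Int :=
  let base_defense_gold := base_defense.zip base_gold
  spaceship_power.foldl
    (fun acc ship =>
      acc ++ [((base_defense_gold.filter (fun p => ship ≥ p.1)).map Prod.snd).sum])
    []

-- ===== PORT B =====
-- _upper_bound(defenses, x, lo, hi): first index in [lo, hi) with x < defenses[idx] (bisect_right).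
-- defenses[mid] is ported as getD (the index is always in range on the calls B makes).
def upperBound (defenses : List Int) (x : Int) (lo hi : Nat) : Nat :=
  if lo ≥ hi then lo
  else if x < defenses.getD ((lo + hi) / 2) 0 then upperBound defenses x lo ((lo + hi) / 2)
  else upperBound defenses x ((lo + hi) / 2 + 1) hi
termination_by hi - lo
decreasing_by all_goals omega

def solve_spaceship_alt (spaceship_power : List Int) (base_defense : List Int) (base_gold : List Int) : List Int :=
  let pairs := PySem.List.sorted (base_defense.zip base_gold) (fun p => p.1)
  let defenses := pairs.map (fun p => p.1)
  let pre := (pairs.foldl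
      (fun (st : List Int × Int) p => (st.1 ++ [st.2 + p.2], st.2 + p.2))
      ([0], 0)).1
  spaceship_power.map
    (fun ship => pre.getD (upperBound defenses ship 0 defenses.length) 0)

-- ===== PRECONDITION & SPEC =====
def Spec_solve_spaceship (spaceship_power : List Int) (base_defense : List Int) (base_gold : List Int) (out : List Int) : Prop := out = solve_spaceship_alt spaceship_power base_defense base_gold
instance (spaceship_power : List Int) (base_defense : List Int) (base_gold : List Int) (out : List Int) : Decidable (Spec_solve_spaceship spaceship_power base_defense base_gold out) := by unfold Spec_solve_spaceship; infer_instance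

-- ===== CLAIM (what is proved, stated in full; the proofs are below) =====
def Claim_equal_solve_spaceship : Prop := ∀ (spaceship_power : List Int) (base_defense : List Int) (base_gold : List Int), Dom_solve_spaceship spaceship_power base_defense base_gold → Spec_solve_spaceship spaceship_power base_defense base_gold (solve_spaceship spaceship_power base_defense base_gold)

-- ===== LEMMAS AND PROOFS =====

-- binary-search correctness: upperBound returns the split point of (≤ x) / (> x) on a sorted list
lemma ub_spec (defenses : List Int) (x : Int)
    (hs : List.Pairwise (fun a b : Int => a ≤ b) defenses) :
    ∀ (n lo hi : Nat), hi - lo ≤ n → lo ≤ hi → hi ≤ defenses.length →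
    (∀ i (h : i < defenses.length), i < lo → defenses[i] ≤ x) →
    (∀ i (h : i < defenses.length), hi ≤ i → x < defenses[i]) →
    lo ≤ upperBound defenses x lo hi ∧ upperBound defenses x lo hi ≤ hi ∧
    (∀ i (h : i < defenses.length), i < upperBound defenses x lo hi → defenses[i] ≤ x) ∧
    (∀ i (h : i < defenses.length), upperBound defenses x lo hi ≤ i → x < defenses[i]) := by
  intro n
  induction n with
  | zero =>
    intro lo hi hn hlohi hlen hlow hhigh
    have hle : lo = hi := by omega
    rw [upperBound, if_pos (by omega)]
    refine ⟨le_refl _, by omega, hlow, ?_⟩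
    intro i h hi'
    exact hhigh i h (by omega)
  | succ m ih =>
    intro lo hi hn hlohi hlen hlow hhigh
    by_cases hge : lo ≥ hi
    · rw [upperBound, if_pos hge]
      refine ⟨le_refl _, by omega, hlow, ?_⟩
      intro i h hi'
      exact hhigh i h (by omega)
    · have hlt : lo < hi := by omega
      have hmid1 : lo ≤ (lo + hi) / 2 := by omega
      have hmid2 : (lo + hi) / 2 < hi := by omega
      have hmidlen : (lo + hi) / 2 < defenses.length := by omega
      have hget : defenses.getD ((lo + hi) / 2) 0 = defenses[(lo + hi) / 2] :=
        List.getD_eq_getElem defenses 0 hmidlen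
      have hmono := List.pairwise_iff_getElem.mp hs
      rw [upperBound, if_neg hge]
      by_cases hx : x < defenses.getD ((lo + hi) / 2) 0
      · rw [if_pos hx]
        have hhigh' : ∀ i (h : i < defenses.length), (lo + hi) / 2 ≤ i → x < defenses[i] := by
          intro i h hi'
          rcases Nat.eq_or_lt_of_le hi' with heq | hlt'
          · subst heq; rw [hget] at hx; exact hx
          · have : defenses[(lo + hi) / 2] ≤ defenses[i] := hmono _ _ hmidlen h hlt'
            rw [hget] at hx; omega
        obtain ⟨h1, h2, h3, h4⟩ := ih lo ((lo + hi) / 2) (by omega) hmid1 (by omega) hlow hhigh'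
        exact ⟨h1, by omega, h3, h4⟩
      · rw [if_neg hx]
        have hxle : defenses[(lo + hi) / 2] ≤ x := by rw [hget] at hx; omega
        have hlow' : ∀ i (h : i < defenses.length), i < (lo + hi) / 2 + 1 → defenses[i] ≤ x := by
          intro i h hi'
          rcases Nat.lt_or_ge i ((lo + hi) / 2) with hlt' | hge'
          · have : defenses[i] ≤ defenses[(lo + hi) / 2] := hmono _ _ h hmidlen hlt'
            omega
          · have : i = (lo + hi) / 2 := by omega
            subst this; exact hxle
        obtain ⟨h1, h2, h3, h4⟩ := ih ((lo + hi) / 2 + 1) hi (by omega) (by omega) hlen hlow' hhigh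
        exact ⟨by omega, h2, h3, h4⟩

-- a predicate that holds exactly on the first r positions cuts the list at r
lemma filter_eq_take {α : Type} (p : α → Bool) :
    ∀ (l : List α) (r : Nat), r ≤ l.length →
    (∀ i (h : i < l.length), i < r → p l[i] = true) →
    (∀ i (h : i < l.length), r ≤ i → p l[i] = false) →
    l.filter p = l.take r := by
  intro l
  induction l with
  | nil => intro r _ _ _; simp
  | cons a t ih =>
    intro r hr hlow hhigh
    cases r with
    | zero =>
      simp only [List.take_zero]
      rw [List.filter_eq_nil_iff]
      intro b hb
      rcases List.mem_iff_getElem.mp hb with ⟨i, h, rfl⟩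
      simp [hhigh i h (Nat.zero_le i)]
    | succ r' =>
      have hpa : p a = true := hlow 0 (by simp) (Nat.succ_pos r')
      rw [List.take_succ_cons, List.filter_cons_of_pos hpa]
      congr 1
      refine ih r' (by simpa using hr) ?_ ?_
      · intro i h hi'
        have := hlow (i + 1) (by simpa using Nat.succ_lt_succ h) (Nat.succ_lt_succ hi')
        simpa using this
      · intro i h hi'
        have := hhigh (i + 1) (by simpa using Nat.succ_lt_succ h) (Nat.succ_le_succ hi')
        simpa using this

-- the prefix-sum loop builds the list of partial sums of the golds
lemma prefix_build :
    ∀ (l : List (Int × Int)) (acc : List Int) (t : Int),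
    (l.foldl (fun (st : List Int × Int) p => (st.1 ++ [st.2 + p.2], st.2 + p.2)) (acc, t)).1
      = acc ++ (List.range l.length).map (fun k => t + ((l.take (k + 1)).map Prod.snd).sum) := by
  intro l
  induction l with
  | nil => intro acc t; simp
  | cons a t ih =>
    intro acc s
    simp only [List.foldl_cons, List.length_cons, ih, List.range_succ_eq_map,
      List.map_cons, List.map_map]
    rw [List.append_assoc]
    congr 1
    rw [List.singleton_append]
    congr 1
    · simp
    · apply List.map_congr_left
      intro k _
      simp only [Function.comp_apply, Nat.succ_eq_add_one, List.take_succ_cons,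
        List.map_cons, List.sum_cons]
      ring

-- getD on the prefix list reads off the sum of the first r golds
lemma prefix_getD (pairs : List (Int × Int)) (r : Nat) (hr : r ≤ pairs.length) :
    ((pairs.foldl (fun (st : List Int × Int) p => (st.1 ++ [st.2 + p.2], st.2 + p.2))
        ([0], 0)).1).getD r 0 = ((pairs.take r).map Prod.snd).sum := by
  rw [prefix_build]
  cases r with
  | zero => simp
  | succ k =>
    have hk : k < pairs.length := by omega
    have hlen : k < (List.map (fun k => (0:Int) + ((pairs.take (k + 1)).map Prod.snd).sum) (List.range pairs.length)).length := by
      simpa using hk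
    rw [List.singleton_append, List.getD_cons_succ, List.getD_eq_getElem _ _ hlen]
    simp

-- per-ship value of A equals per-ship value of B
lemma per_ship_eq (base_defense base_gold : List Int) (ship : Int) :
    ((( (base_defense.zip base_gold).filter (fun p => ship ≥ p.1)).map Prod.snd)).sum
      = (((PySem.List.sorted (base_defense.zip base_gold) (fun p => p.1)).foldl
            (fun (st : List Int × Int) p => (st.1 ++ [st.2 + p.2], st.2 + p.2)) ([0], 0)).1).getD
          (upperBound ((PySem.List.sorted (base_defense.zip base_gold) (fun p => p.1)).map (fun p => p.1)) ship 0
            ((PySem.List.sorted (base_defense.zip base_gold) (fun p => p.1)).map (fun p => p.1)).length) 0 := by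
  set pairs0 := base_defense.zip base_gold with hpairs0
  set pairs := PySem.List.sorted pairs0 (fun p => p.1) with hpairs
  set defenses := pairs.map (fun p => p.1) with hdef
  have hlen : defenses.length = pairs.length := by simp [hdef]
  have hperm : pairs.Perm pairs0 := PySem.List.sorted_perm pairs0 (fun p => p.1) false
  have hs : List.Pairwise (fun a b : Int => a ≤ b) defenses := by
    rw [hdef, List.pairwise_map]
    exact PySem.List.sorted_pairwise pairs0 (fun p => p.1)
  have hub := ub_spec defenses ship hs defenses.length 0 defenses.length (by omega) (by omega)
    (le_refl _) (by omega) (by omega)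
  obtain ⟨-, hle, hlow, hhigh⟩ := hub
  set r := upperBound defenses ship 0 defenses.length with hrdef
  have hfilter : pairs.filter (fun p => ship ≥ p.1) = pairs.take r := by
    apply filter_eq_take
    · omega
    · intro i h hi'
      have h' : i < defenses.length := by omega
      have := hlow i h' hi'
      simp only [hdef, List.getElem_map] at this
      simpa using this
    · intro i h hi'
      have h' : i < defenses.length := by omega
      have := hhigh i h' hi'
      simp only [hdef, List.getElem_map] at this
      simp
      omega
  have hpermsum : ((pairs0.filter (fun p => ship ≥ p.1)).map Prod.snd).sum
      = ((pairs.filter (fun p => ship ≥ p.1)).map Prod.snd).sum :=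
    (List.Perm.sum_eq (List.Perm.map Prod.snd (List.Perm.filter _ (List.Perm.symm hperm))))
  rw [hpermsum, hfilter, prefix_getD pairs r (by omega)]

-- ===== VERDICT (by name: the statement is the Claim_ definition above) =====
theorem solve_spaceship_spec : Claim_equal_solve_spaceship := by
  intro sp bd bg _
  unfold Spec_solve_spaceship solve_spaceship solve_spaceship_alt
  rw [PySem.List.foldl_append_singleton_eq_map, List.nil_append]
  apply List.map_congr_left
  intro ship _
  exact per_ship_eq bd bg ship
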